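-- pv_equiv track=rewrite | github.com/netra-systems/zen | dev_launcher/local_secrets.py | _is_invalid_secret_value
-- ===== SOURCE A (Python) =====
-- def _is_invalid_secret_value(value: str) -> bool:
--     """Check if secret value is invalid or placeholder."""
--     if not value or value.isspace():
--         return True
--
--     # Common placeholder patterns
--     placeholder_patterns = [
--         'your_', 'YOUR_', 'placeholder', 'PLACEHOLDER',
--         'change_me', 'CHANGE_ME', 'todo', 'TODO',
--         'xxx', 'XXX', '***'
--     ]
--
--     value_lower = value.lower()
--     return any(pattern.lower() in value_lower for pattern in placeholder_patterns)
-- ===== SOURCE B (Python) =====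
-- # Alternative implementation: one left-to-right scan over positions, checking all
-- # (lowercase-deduplicated) placeholder patterns at each position, instead of one
-- # substring search per pattern over a pre-lowered copy of the whole string.
-- _PLACEHOLDERS = ('your_', 'placeholder', 'change_me', 'todo', 'xxx', '***')
--
--
-- def _is_invalid_secret_value(value: str) -> bool:
--     """Check if secret value is invalid or placeholder."""
--     if not value or value.isspace():
--         return True
--     return any(
--         value[i:i + len(p)].lower() == p
--         for i in range(len(value))
--         for p in _PLACEHOLDERS
--     )
-- ===== Notes on version B (the rewrite author's own statement) =====
-- stated objective: alternative
-- what changed: Replaces the per-pattern substring searches over a pre-lowered copy of the string with a single left-to-right scan over positions that compares each of the six lowercase-deduplicated patterns against the slice starting there.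
import Mathlib
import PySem

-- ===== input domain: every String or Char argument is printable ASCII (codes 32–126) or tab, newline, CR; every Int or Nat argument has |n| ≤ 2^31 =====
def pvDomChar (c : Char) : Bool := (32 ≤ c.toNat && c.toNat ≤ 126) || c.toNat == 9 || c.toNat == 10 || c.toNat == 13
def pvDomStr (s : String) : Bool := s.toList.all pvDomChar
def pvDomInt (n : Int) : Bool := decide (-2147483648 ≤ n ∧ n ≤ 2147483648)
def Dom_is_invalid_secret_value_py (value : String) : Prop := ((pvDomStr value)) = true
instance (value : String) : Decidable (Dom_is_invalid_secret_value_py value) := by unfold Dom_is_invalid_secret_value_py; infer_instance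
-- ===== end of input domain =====

-- B replaces A's per-pattern substring searches over value.lower() by one scan over
-- positions comparing each deduplicated lowercase pattern against the slice there (alternative; no speed claim).

-- ===== PORT A =====
def pvPatternsA : List String :=
  ["your_", "YOUR_", "placeholder", "PLACEHOLDER",
   "change_me", "CHANGE_ME", "todo", "TODO",
   "xxx", "XXX", "***"]

def is_invalid_secret_value_py (value : String) : Bool :=
  if value.toList.isEmpty || PySem.Str.strIsspace value then true
  else
    let value_lower := PySem.Str.lower value
    pvPatternsA.any (fun pattern => PySem.Str.isIn (PySem.Str.lower pattern) value_lower)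

-- ===== PORT B =====
def pvPlaceholders : List String := ["your_", "placeholder", "change_me", "todo", "xxx", "***"]

def is_invalid_secret_value_py_alt (value : String) : Bool :=
  if value.toList.isEmpty || PySem.Str.strIsspace value then true
  else
    (PySem.List.pyRange 0 (PySem.Str.len value) 1).any (fun i =>
      pvPlaceholders.any (fun p =>
        PySem.Str.lower (PySem.Str.slice value (some i) (some (i + PySem.Str.len p))) == p))

-- ===== PRECONDITION & SPEC =====
def Spec_is_invalid_secret_value_py (value : String) (out : Bool) : Prop := out = is_invalid_secret_value_py_alt value
instance (value : String) (out : Bool) : Decidable (Spec_is_invalid_secret_value_py value out) := by unfold Spec_is_invalid_secret_value_py; infer_instance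

-- ===== CLAIM (what is proved, stated in full; the proofs are below) =====
def Claim_equal_is_invalid_secret_value_py : Prop := ∀ (value : String), Dom_is_invalid_secret_value_py value → Spec_is_invalid_secret_value_py value (is_invalid_secret_value_py value)

-- ===== LEMMAS AND PROOFS =====

-- For a nonempty lowercase pattern p, B's position scan for p on value finds p
-- exactly when p occurs as a substring of value.lower().
theorem pv_scan_eq_isIn (value p : String) (hp : p.toList ≠ []) :
    ((PySem.List.pyRange 0 (PySem.Str.len value) 1).any (fun i =>
        PySem.Str.lower (PySem.Str.slice value (some i) (some (i + PySem.Str.len p))) == p))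
    = PySem.Str.isIn p (PySem.Str.lower value) := by
  rw [Bool.eq_iff_iff]
  simp only [List.any_eq_true, PySem.List.mem_pyRange_one, beq_iff_eq, ← String.toList_inj,
    PySem.Str.toList_lower, PySem.Str.toList_slice, PySem.Str.len_eq, PySem.Str.isIn_iff_infix,
    PySem.Chars.slice_eq_listSlice]
  rw [← PySem.Chars.isIn_iff_infix, ← PySem.Chars.exists_prefix_drop_iff_isIn]
  have hlow : ∀ l : List Char, PySem.Chars.lower l = l.map PySem.Chars.lowerChar := fun _ => rfl
  constructor
  · rintro ⟨x, ⟨hx0, hxn⟩, heq⟩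
    lift x to ℕ using hx0 with j
    rw [PySem.List.slice_natCast_add, hlow, List.map_take, List.map_drop, ← hlow] at heq
    exact ⟨j, heq ▸ List.take_prefix _ _⟩
  · rintro ⟨j, hpre⟩
    have hlen : (PySem.Chars.lower value.toList).length = value.toList.length := by
      rw [hlow]; exact List.length_map ..
    have hj : j < value.toList.length := by
      by_contra h
      have : (PySem.Chars.lower value.toList).drop j = [] := by
        apply List.drop_eq_nil_of_le; omega
      rw [this] at hpre
      exact hp (List.prefix_nil.mp hpre)
    refine ⟨(j : Int), ⟨by positivity, by exact_mod_cast hj⟩, ?_⟩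
    rw [PySem.List.slice_natCast_add, hlow, List.map_take, List.map_drop, ← hlow]
    rw [List.prefix_iff_eq_take] at hpre
    exact hpre.symm

theorem pv_any_swap {α β : Type} (l : List α) (m : List β) (f : α → β → Bool) :
    (l.any (fun a => m.any (fun b => f a b))) = (m.any (fun b => l.any (fun a => f a b))) := by
  rw [Bool.eq_iff_iff]
  simp only [List.any_eq_true]
  exact ⟨fun ⟨a, ha, b, hb, h⟩ => ⟨b, hb, a, ha, h⟩, fun ⟨b, hb, a, ha, h⟩ => ⟨a, ha, b, hb, h⟩⟩

-- ===== VERDICT (by name: the statement is the Claim_ definition above) =====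
theorem is_invalid_secret_value_py_spec : Claim_equal_is_invalid_secret_value_py := by
  intro value _
  unfold Spec_is_invalid_secret_value_py is_invalid_secret_value_py is_invalid_secret_value_py_alt
  split
  · rfl
  · rw [pv_any_swap]
    simp only [pvPatternsA, pvPlaceholders, List.any_cons, List.any_nil]
    rw [pv_scan_eq_isIn value "your_" (by decide), pv_scan_eq_isIn value "placeholder" (by decide),
        pv_scan_eq_isIn value "change_me" (by decide), pv_scan_eq_isIn value "todo" (by decide),
        pv_scan_eq_isIn value "xxx" (by decide), pv_scan_eq_isIn value "***" (by decide)]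
    rw [show PySem.Str.lower "your_" = "your_" from by decide,
        show PySem.Str.lower "YOUR_" = "your_" from by decide,
        show PySem.Str.lower "placeholder" = "placeholder" from by decide,
        show PySem.Str.lower "PLACEHOLDER" = "placeholder" from by decide,
        show PySem.Str.lower "change_me" = "change_me" from by decide,
        show PySem.Str.lower "CHANGE_ME" = "change_me" from by decide,
        show PySem.Str.lower "todo" = "todo" from by decide,
        show PySem.Str.lower "TODO" = "todo" from by decide,
        show PySem.Str.lower "xxx" = "xxx" from by decide,
        show PySem.Str.lower "XXX" = "xxx" from by decide,
        show PySem.Str.lower "***" = "***" from by decide]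
    simp only [Bool.or_self_left, Bool.or_false]
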